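-- pv_equiv track=rewrite | github.com/YAOLQ2024/Depression | depression/EEG/lsl_sender.py | _parse_known_peers
-- ===== SOURCE A (Python) =====
-- from typing import Callable, List, Optional, Sequence
--
-- def _parse_known_peers(raw_values: Sequence[str]) -> List[str]:
--     peers: List[str] = []
--     for raw in raw_values:
--         if not raw:
--             continue
--         normalized = raw.replace("\n", ",").replace(";", ",")
--         for part in normalized.split(","):
--             candidate = part.strip()
--             if candidate:
--                 peers.append(candidate)
--     return peers
-- ===== SOURCE B (Python) =====
-- from typing import List, Sequence
--
--
-- def _parse_known_peers(raw_values: Sequence[str]) -> List[str]: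
--     # One flat pass: join the non-empty raws, normalize separators once, split once.
--     combined = ",".join(raw for raw in raw_values if raw)
--     normalized = combined.replace("\n", ",").replace(";", ",")
--     return [candidate for candidate in (part.strip() for part in normalized.split(",")) if candidate]
-- ===== Notes on version B (the rewrite author's own statement) =====
-- stated objective: simpler
-- what changed: Replaces the nested per-raw/per-part loops with a single flat pass: non-empty raws are joined into one comma-separated string, separators are normalized once on that string, and one split plus a comprehension yields the result.
import Mathlib
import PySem

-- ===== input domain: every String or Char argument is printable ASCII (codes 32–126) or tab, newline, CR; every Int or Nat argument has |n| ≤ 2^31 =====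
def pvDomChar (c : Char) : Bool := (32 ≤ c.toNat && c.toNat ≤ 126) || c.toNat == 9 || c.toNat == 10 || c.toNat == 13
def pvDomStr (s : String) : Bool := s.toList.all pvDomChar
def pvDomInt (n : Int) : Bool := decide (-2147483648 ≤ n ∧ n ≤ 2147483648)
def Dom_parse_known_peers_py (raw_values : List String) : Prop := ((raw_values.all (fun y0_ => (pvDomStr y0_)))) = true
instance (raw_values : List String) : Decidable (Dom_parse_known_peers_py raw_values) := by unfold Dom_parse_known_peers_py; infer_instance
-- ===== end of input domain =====

-- B joins the non-empty raws with ',', normalizes separators once, and does one split + filter;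
-- same result as A's nested loops, proved equal on all inputs (objective: simpler, one flat pass).

-- ===== PORT A =====
-- A: outer loop over raws (skip falsy), per-raw normalize + split(",") + inner loop appending stripped non-empty parts.
def parse_known_peers_py (raw_values : List String) : List String :=
  raw_values.foldl (fun peers raw =>
    if raw = "" then peers
    else
      let normalized := PySem.Str.replace (PySem.Str.replace raw "\n" ",") ";" ","
      (PySem.Chars.splitOn normalized.toList (",".toList)).foldl (fun peers part =>
        let candidate := PySem.Chars.strip part
        if candidate ≠ [] then peers ++ [String.ofList candidate] else peers) peers) []

-- ===== PORT B =====
-- B: join non-empty raws with ',', normalize the single combined string, one split, one map/filter.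
def parse_known_peers_py_alt (raw_values : List String) : List String :=
  let combined := PySem.Str.join "," (raw_values.filter (fun r => r ≠ ""))
  let normalized := PySem.Str.replace (PySem.Str.replace combined "\n" ",") ";" ","
  (((PySem.Chars.splitOn normalized.toList (",".toList)).map PySem.Chars.strip).filter
      (fun c => c ≠ [])).map String.ofList

-- ===== PRECONDITION & SPEC =====
def Spec_parse_known_peers_py (raw_values : List String) (out : List String) : Prop := out = parse_known_peers_py_alt raw_values
instance (raw_values : List String) (out : List String) : Decidable (Spec_parse_known_peers_py raw_values out) := by unfold Spec_parse_known_peers_py; infer_instance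

-- ===== CLAIM (what is proved, stated in full; the proofs are below) =====
def Claim_equal_parse_known_peers_py : Prop := ∀ (raw_values : List String), Dom_parse_known_peers_py raw_values → Spec_parse_known_peers_py raw_values (parse_known_peers_py raw_values)

-- ===== LEMMAS AND PROOFS =====

-- the separator-normalizing character map (both replaces composed)
def pvNormC (c : Char) : Char := if (if c = '\n' then ',' else c) = ';' then ',' else (if c = '\n' then ',' else c)

-- simple recursive single-character split (reference model for PySem.Chars.splitOn with a 1-char sep)
def pvSplitC (sep : Char) : List Char → List (List Char)
  | [] => [[]]
  | c :: t =>
    if c = sep then [] :: pvSplitC sep t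
    else
      match pvSplitC sep t with
      | [] => [[c]]
      | h :: r => (c :: h) :: r

-- strip each part, keep non-empty, pack into strings
def pvF (parts : List (List Char)) : List String :=
  ((parts.map PySem.Chars.strip).filter (fun c => c ≠ [])).map String.ofList

lemma pvSplitC_ne_nil (sep : Char) (cs : List Char) : pvSplitC sep cs ≠ [] := by
  cases cs with
  | nil => simp [pvSplitC]
  | cons c t =>
    simp only [pvSplitC]
    split
    · simp
    · cases h : pvSplitC sep t <;> simp

lemma pvReplace_go_single (o n : Char) :
    ∀ (fuel : Nat) (cs acc : List Char), cs.length ≤ fuel →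
      PySem.Chars.replace.go [o] [n] fuel cs acc
        = acc.reverse ++ cs.map (fun c => if c = o then n else c) := by
  intro fuel
  induction fuel with
  | zero =>
    intro cs acc h
    have : cs = [] := by cases cs <;> simp_all
    subst this
    simp [PySem.Chars.replace.go]
  | succ m ih =>
    intro cs acc h
    cases cs with
    | nil => simp [PySem.Chars.replace.go]
    | cons c t =>
      simp only [PySem.Chars.replace.go]
      by_cases hc : c = o
      · have hpf : List.isPrefixOf [o] (c :: t) = true := by
          simp [List.isPrefixOf, hc]
        rw [if_pos hpf]
        have := ih (List.drop 1 (c :: t)) ([n].reverse ++ acc) (by simp at h ⊢; omega)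
        simpa [hc] using this
      · have hpf : List.isPrefixOf [o] (c :: t) = false := by
          simp [List.isPrefixOf]
          exact fun hh => absurd hh.symm hc
        rw [hpf]
        simp only [Bool.false_eq_true, if_false]
        have := ih t (c :: acc) (by simp at h ⊢; omega)
        simpa [hc] using this

lemma pvReplace_single (cs : List Char) (o n : Char) :
    PySem.Chars.replace cs [o] [n] = cs.map (fun c => if c = o then n else c) := by
  simp only [PySem.Chars.replace, List.isEmpty_cons, Bool.false_eq_true, if_false]
  simpa using pvReplace_go_single o n cs.length cs [] le_rfl

-- prepend to the first piece
def pvPre (x : List Char) : List (List Char) → List (List Char)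
  | [] => [x]
  | h :: r => (x ++ h) :: r

lemma pvSplitOn_go_single (s : Char) :
    ∀ (fuel : Nat) (l cur : List Char) (acc : List (List Char)), l.length ≤ fuel →
      PySem.Chars.splitOn.go [s] fuel l cur acc
        = acc.reverse ++ pvPre cur.reverse (pvSplitC s l) := by
  intro fuel
  induction fuel with
  | zero =>
    intro l cur acc h
    have : l = [] := by cases l <;> simp_all
    subst this
    simp [PySem.Chars.splitOn.go, pvSplitC, pvPre]
  | succ m ih =>
    intro l cur acc h
    cases l with
    | nil => simp [PySem.Chars.splitOn.go, pvSplitC, pvPre]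
    | cons c rest =>
      simp only [PySem.Chars.splitOn.go]
      by_cases hc : c = s
      · have hpf : List.isPrefixOf [s] (c :: rest) = true := by
          simp [List.isPrefixOf, hc]
        rw [if_pos hpf]
        have hdrop : List.drop [s].length (c :: rest) = rest := by simp
        have := ih rest [] (cur.reverse :: acc) (by simp at h ⊢; omega)
        rw [hdrop, this]
        simp [pvSplitC, hc, pvPre]
        cases hr : pvSplitC s rest with
        | nil => exact absurd hr (pvSplitC_ne_nil s rest)
        | cons hh rr => simp
      · have hpf : List.isPrefixOf [s] (c :: rest) = false := by
          simp [List.isPrefixOf]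
          exact fun hh => absurd hh.symm hc
        rw [hpf]
        simp only [Bool.false_eq_true, if_false]
        have := ih rest (c :: cur) acc (by simp at h ⊢; omega)
        rw [this]
        simp only [pvSplitC, if_neg hc]
        cases hr : pvSplitC s rest with
        | nil => exact absurd hr (pvSplitC_ne_nil s rest)
        | cons hh rr => simp [pvPre]

lemma pvSplitOn_single (cs : List Char) (s : Char) :
    PySem.Chars.splitOn cs [s] = pvSplitC s cs := by
  simp only [PySem.Chars.splitOn]
  rw [pvSplitOn_go_single s (cs.length + 1) cs [] [] (by omega)]
  cases hr : pvSplitC s cs with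
  | nil => exact absurd hr (pvSplitC_ne_nil s cs)
  | cons hh rr => simp [pvPre]

lemma pvSplitC_append (sep : Char) (a b : List Char) :
    pvSplitC sep (a ++ sep :: b) = pvSplitC sep a ++ pvSplitC sep b := by
  induction a with
  | nil => simp [pvSplitC]
  | cons c t ih =>
    simp only [List.cons_append, pvSplitC, ih]
    by_cases hc : c = sep
    · simp [hc]
    · simp only [if_neg hc]
      cases hr : pvSplitC sep t with
      | nil => exact absurd hr (pvSplitC_ne_nil sep t)
      | cons hh rr => simp

lemma pvSplitC_intercalate (sep : Char) (x : List Char) (xs : List (List Char)) :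
    pvSplitC sep (List.intercalate [sep] (x :: xs))
      = pvSplitC sep x ++ xs.flatMap (pvSplitC sep) := by
  induction xs generalizing x with
  | nil => simp [List.intercalate]
  | cons y ys ih =>
    have hstep : List.intercalate [sep] (x :: y :: ys)
        = x ++ sep :: List.intercalate [sep] (y :: ys) := by
      simp [List.intercalate, List.intersperse]
    rw [hstep, pvSplitC_append, ih y]
    simp

lemma pvMap_intercalate (f : Char → Char) (s : List Char) (xs : List (List Char)) :
    (List.intercalate s xs).map f = List.intercalate (s.map f) (xs.map (List.map f)) := by
  induction xs with
  | nil => simp [List.intercalate]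
  | cons x ys ih =>
    cases ys with
    | nil => simp [List.intercalate]
    | cons y zs =>
      have h1 : List.intercalate s (x :: y :: zs) = x ++ s ++ List.intercalate s (y :: zs) := by
        simp [List.intercalate, List.intersperse]
      have h2 : List.intercalate (s.map f) (x.map f :: y.map f :: zs.map (List.map f))
          = x.map f ++ s.map f ++ List.intercalate (s.map f) (y.map f :: zs.map (List.map f)) := by
        simp [List.intercalate, List.intersperse]
      simp only [List.map_cons] at ih ⊢
      rw [h1, h2, ← ih]
      simp

lemma pvF_append (l1 l2 : List (List Char)) : pvF (l1 ++ l2) = pvF l1 ++ pvF l2 := by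
  simp [pvF]

lemma pvF_flatMap {α : Type} (xs : List α) (g : α → List (List Char)) :
    pvF (xs.flatMap g) = xs.flatMap (fun x => pvF (g x)) := by
  induction xs with
  | nil => simp [pvF]
  | cons x t ih => simp [List.flatMap_cons, pvF_append, ih]

-- both replaces, at the character-list level, are the map of pvNormC
lemma pvNorm_eq (cs : List Char) :
    (PySem.Chars.replace (PySem.Chars.replace cs [ '\n' ] [ ',' ]) [ ';' ] [ ',' ])
      = cs.map pvNormC := by
  rw [pvReplace_single, pvReplace_single, List.map_map]
  rfl

-- one raw's contribution in A equals pvF of the single-char split of its normalization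
lemma pvInner_fold (parts : List (List Char)) (peers : List String) :
    parts.foldl (fun peers part =>
        let candidate := PySem.Chars.strip part
        if candidate ≠ [] then peers ++ [String.ofList candidate] else peers) peers
      = peers ++ pvF parts := by
  induction parts generalizing peers with
  | nil => simp [pvF]
  | cons p t ih =>
    simp only [List.foldl_cons, ih]
    by_cases hp : PySem.Chars.strip p = []
    · simp [pvF, hp]
    · simp [pvF, hp]

def pvPiece (r : String) : List String :=
  pvF (pvSplitC ',' (r.toList.map pvNormC))

lemma pvComma : (",".toList) = [','] := rfl
lemma pvNl : ("\n".toList) = ['\n'] := rfl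
lemma pvSemi : (";".toList) = [';'] := rfl
lemma pvSepMap : ([','] : List Char).map pvNormC = [','] := rfl

lemma pvF_eq (parts : List (List Char)) :
    ((parts.map PySem.Chars.strip).filter (fun c => c ≠ [])).map String.ofList = pvF parts := rfl

lemma pvStrNorm (s : String) :
    (PySem.Str.replace (PySem.Str.replace s "\n" ",") ";" ",").toList
      = s.toList.map pvNormC := by
  simp only [PySem.Str.toList_replace, pvNl, pvSemi, pvComma]
  exact pvNorm_eq s.toList

def pvStep (peers : List String) (raw : String) : List String :=
  if raw = "" then peers
  else
    let normalized := PySem.Str.replace (PySem.Str.replace raw "\n" ",") ";" ","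
    (PySem.Chars.splitOn normalized.toList (",".toList)).foldl (fun peers part =>
      let candidate := PySem.Chars.strip part
      if candidate ≠ [] then peers ++ [String.ofList candidate] else peers) peers

lemma pvStep_eq (peers : List String) (raw : String) :
    pvStep peers raw = if raw = "" then peers else peers ++ pvPiece raw := by
  unfold pvStep
  by_cases hr : raw = ""
  · simp [hr]
  · rw [if_neg hr, if_neg hr]
    simp only [pvStrNorm, pvComma]
    rw [pvSplitOn_single, pvInner_fold]
    rfl

lemma pvFold (l : List String) : ∀ peers : List String,
    List.foldl pvStep peers l = peers ++ (l.filter (fun r => r ≠ "")).flatMap pvPiece := by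
  induction l with
  | nil => intro peers; simp
  | cons r t ih =>
    intro peers
    rw [List.foldl_cons, pvStep_eq, ih]
    by_cases hr : r = ""
    · simp [hr]
    · simp [hr]

lemma pvA_eq (raw_values : List String) :
    parse_known_peers_py raw_values
      = (raw_values.filter (fun r => r ≠ "")).flatMap pvPiece := by
  unfold parse_known_peers_py
  show List.foldl pvStep [] raw_values = _
  rw [pvFold raw_values []]
  exact List.nil_append _

lemma pvB_eq (raw_values : List String) :
    parse_known_peers_py_alt raw_values
      = (raw_values.filter (fun r => r ≠ "")).flatMap pvPiece := by
  simp only [parse_known_peers_py_alt]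
  rw [pvStrNorm, pvComma, pvSplitOn_single, pvF_eq]
  have hjoin : (PySem.Str.join "," (raw_values.filter (fun r => r ≠ ""))).toList
      = List.intercalate [','] ((raw_values.filter (fun r => r ≠ "")).map String.toList) := by
    simp [PySem.Str.join, PySem.Chars.join, pvComma]
  rw [hjoin, pvMap_intercalate, pvSepMap]
  cases hf : raw_values.filter (fun r => r ≠ "") with
  | nil => rfl
  | cons x xs =>
    simp only [List.map_cons]
    rw [pvSplitC_intercalate, pvF_append]
    simp only [List.map_map]
    rw [List.flatMap_map, pvF_flatMap]
    have hfun : (fun a : String => pvF (pvSplitC ',' ((List.map pvNormC ∘ String.toList) a))) = pvPiece := by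
      funext r
      simp [pvPiece, Function.comp]
    rw [hfun, List.flatMap_cons]
    rfl

-- ===== VERDICT (by name: the statement is the Claim_ definition above) =====
theorem parse_known_peers_py_spec : Claim_equal_parse_known_peers_py := by
  intro raw_values _
  unfold Spec_parse_known_peers_py
  rw [pvA_eq, pvB_eq]
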